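-- pv_equiv track=rewrite | github.com/thao1923/is212-g3t8 | is103/Project1 (v1.0)/q3/p1q3_utility.py | get_total_cost
-- ===== SOURCE A (Python) =====
-- def get_total_cost(advertisers, c):
--   total_cost = 0
--   for a in advertisers:
--     if a>=0 and a<len(c):
--       total_cost += c[a]
--     else:
--       return -1 #error
--   return total_cost
-- ===== SOURCE B (Python) =====
-- def get_total_cost(advertisers, c):
--   if not advertisers:
--     return 0
--   if min(advertisers) < 0 or max(advertisers) >= len(c):
--     return -1
--   return sum(c[a] for a in advertisers)
-- ===== Notes on version B (the rewrite author's own statement) =====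
-- stated objective: alternative
-- what changed: Bounds validation is done via the extremes (min(advertisers) >= 0 and max(advertisers) < len(c)) instead of testing each index in the loop, followed by a separate sum over the indexed costs.
import Mathlib
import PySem

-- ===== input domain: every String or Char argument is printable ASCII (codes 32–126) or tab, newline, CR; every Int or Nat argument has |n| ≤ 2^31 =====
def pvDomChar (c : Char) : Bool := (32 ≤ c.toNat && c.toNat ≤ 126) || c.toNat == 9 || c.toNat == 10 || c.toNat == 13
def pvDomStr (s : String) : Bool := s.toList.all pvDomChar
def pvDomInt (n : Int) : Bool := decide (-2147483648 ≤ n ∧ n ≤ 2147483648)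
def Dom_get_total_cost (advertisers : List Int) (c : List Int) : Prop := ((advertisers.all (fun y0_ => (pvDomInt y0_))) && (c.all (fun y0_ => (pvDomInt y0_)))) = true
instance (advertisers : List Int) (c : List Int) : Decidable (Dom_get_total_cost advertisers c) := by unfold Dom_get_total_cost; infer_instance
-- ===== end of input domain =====

-- B validates all indices at once through the extremes (min/max of advertisers against len(c)) and then sums separately; A interleaves a per-element bounds test with the accumulation.
-- ===== PORT A =====
-- the for-loop with early return, as structural recursion over the same accumulator
def get_total_cost_loop (c : List Int) : List Int → Int → Int
  | [], total_cost => total_cost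
  | a :: rest, total_cost =>
      if a ≥ 0 ∧ a < (c.length : Int) then
        get_total_cost_loop c rest (total_cost + (PySem.List.pyGet? c a).getD 0)
      else
        -1

def get_total_cost (advertisers : List Int) (c : List Int) : Int :=
  get_total_cost_loop c advertisers 0

-- ===== PORT B =====
def get_total_cost_alt (advertisers : List Int) (c : List Int) : Int :=
  if advertisers = [] then 0
  else if (PySem.List.min? advertisers (fun a => a)).getD 0 < 0 ∨
          (PySem.List.max? advertisers (fun a => a)).getD 0 ≥ (c.length : Int) then -1
  else (advertisers.map (fun a => (PySem.List.pyGet? c a).getD 0)).sum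

-- ===== PRECONDITION & SPEC =====
def Spec_get_total_cost (advertisers : List Int) (c : List Int) (out : Int) : Prop := out = get_total_cost_alt advertisers c
instance (advertisers : List Int) (c : List Int) (out : Int) : Decidable (Spec_get_total_cost advertisers c out) := by unfold Spec_get_total_cost; infer_instance

-- ===== CLAIM (what is proved, stated in full; the proofs are below) =====
def Claim_equal_get_total_cost : Prop := ∀ (advertisers : List Int) (c : List Int), Dom_get_total_cost advertisers c → Spec_get_total_cost advertisers c (get_total_cost advertisers c)

-- ===== LEMMAS AND PROOFS =====
theorem get_total_cost_loop_eq (c : List Int) (advs : List Int) (acc : Int) :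
    get_total_cost_loop c advs acc =
      if advs.all (fun a => decide (0 ≤ a ∧ a < (c.length : Int))) then
        acc + (advs.map (fun a => (PySem.List.pyGet? c a).getD 0)).sum
      else
        -1 := by
  induction advs generalizing acc with
  | nil => simp [get_total_cost_loop]
  | cons a rest ih =>
    simp only [get_total_cost_loop, List.all_cons, List.map_cons, List.sum_cons]
    by_cases h : 0 ≤ a ∧ a < (c.length : Int)
    · have h' : a ≥ 0 ∧ a < (c.length : Int) := ⟨h.1, h.2⟩
      rw [if_pos h', ih]
      simp [h]
      split <;> [ring; rfl]
    · have h' : ¬ (a ≥ 0 ∧ a < (c.length : Int)) := fun hc => h ⟨hc.1, hc.2⟩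
      rw [if_neg h']
      simp [h]

-- all indices in bounds ↔ the extremes are in bounds (for a nonempty list)
theorem all_iff_extremes (advs : List Int) (n : Int) (hne : advs ≠ []) :
    (advs.all (fun a => decide (0 ≤ a ∧ a < n)) = true) ↔
      ¬ ((PySem.List.min? advs (fun a => a)).getD 0 < 0 ∨
         (PySem.List.max? advs (fun a => a)).getD 0 ≥ n) := by
  obtain ⟨m, hm⟩ : ∃ m, PySem.List.min? advs (fun a => a) = some m := by
    cases h : PySem.List.min? advs (fun a => a) with
    | none => exact absurd ((PySem.List.min?_eq_none_iff _ _).mp h) hne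
    | some m => exact ⟨m, rfl⟩
  obtain ⟨M, hM⟩ : ∃ M, PySem.List.max? advs (fun a => a) = some M := by
    cases h : PySem.List.max? advs (fun a => a) with
    | none => exact absurd ((PySem.List.max?_eq_none_iff _ _).mp h) hne
    | some M => exact ⟨M, rfl⟩
  have hmem : m ∈ advs := PySem.List.min?_mem hm
  have hMem : M ∈ advs := PySem.List.max?_mem hM
  have hmin := PySem.List.min?_isMin hm
  have hmax := PySem.List.max?_isMax hM
  rw [hm, hM]
  simp only [Option.getD_some, List.all_eq_true, decide_eq_true_eq]
  constructor
  · intro hall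
    push Not
    exact ⟨(hall m hmem).1, (hall M hMem).2⟩
  · intro h a ha
    push Not at h
    exact ⟨le_trans h.1 (hmin a ha), lt_of_le_of_lt (hmax a ha) h.2⟩

-- ===== VERDICT (by name: the statement is the Claim_ definition above) =====
theorem get_total_cost_spec : Claim_equal_get_total_cost := by
  intro advertisers c _
  unfold Spec_get_total_cost get_total_cost get_total_cost_alt
  rw [get_total_cost_loop_eq]
  by_cases hne : advertisers = []
  · subst hne; simp
  · rw [if_neg hne]
    by_cases hall : advertisers.all (fun a => decide (0 ≤ a ∧ a < (c.length : Int))) = true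
    · rw [if_pos hall, if_neg ((all_iff_extremes advertisers _ hne).mp hall), zero_add]
    · rw [if_neg hall, if_pos (by
        by_contra h
        exact hall ((all_iff_extremes advertisers _ hne).mpr h))]
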